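-- pv_equiv track=rewrite | github.com/botondDonath/nonogram-command-line-game-with-python | generate.py | get_set_row
-- ===== SOURCE A (Python) =====
-- def get_set_row(row):
--     set_row = []
--     empty_previous = True
--     for i, cell in enumerate(row):
--         if cell and empty_previous:
--             start = i
--             empty_previous = False
--             if i == len(row) - 1:
--                 set_row.append([i, i])
--         elif cell and not empty_previous and i == len(row) - 1:
--             end = i
--             set_row.append([start, end])
--         elif not cell and not empty_previous:
--             end = i - 1
--             set_row.append([start, end])
--             empty_previous = True
--     return set_row
-- ===== SOURCE B (Python) =====
-- def get_set_row(row):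
--     runs = []
--     i = 0
--     n = len(row)
--     while i < n:
--         if not row[i]:
--             i += 1
--             continue
--         j = i
--         while j + 1 < n and row[j + 1]:
--             j += 1
--         runs.append([i, j])
--         i = j + 1
--     return runs
-- ===== Notes on version B (the rewrite author's own statement) =====
-- stated objective: alternative
-- what changed: Replaces A's per-cell enumerate state machine (empty_previous/start flags with special last-cell branches) by a run-skipping two-pointer scan: the outer loop finds a run start, an inner loop advances to the run end, the run is emitted and the scan resumes past it.
import Mathlib
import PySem

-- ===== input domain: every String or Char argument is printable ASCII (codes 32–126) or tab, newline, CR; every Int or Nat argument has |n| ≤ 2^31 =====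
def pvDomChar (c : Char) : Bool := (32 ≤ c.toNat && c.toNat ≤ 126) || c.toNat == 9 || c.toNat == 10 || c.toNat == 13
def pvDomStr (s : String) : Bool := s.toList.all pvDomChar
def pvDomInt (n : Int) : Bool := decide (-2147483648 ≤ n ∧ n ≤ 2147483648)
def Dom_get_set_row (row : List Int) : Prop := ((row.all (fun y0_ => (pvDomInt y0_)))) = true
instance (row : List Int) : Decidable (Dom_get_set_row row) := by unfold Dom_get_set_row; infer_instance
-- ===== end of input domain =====

-- B replaces A's per-cell empty_previous/start state machine by a run-skipping
-- two-pointer scan (objective: alternative; same O(n) cost).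

-- ===== PORT A =====
-- A's loop body, one enumerate step over the state (set_row, empty_previous, start)
def stepA (n : Int) (s : List (List Int) × Bool × Int) (p : Int × Int) :
    List (List Int) × Bool × Int :=
  match s, p with
  | (set_row, empty_previous, start), (i, cell) =>
    if cell ≠ 0 ∧ empty_previous then
      -- start = i; empty_previous = False; append [i, i] on the last cell
      if i = n - 1 then (set_row ++ [[i, i]], false, i) else (set_row, false, i)
    else if cell ≠ 0 ∧ ¬ empty_previous ∧ i = n - 1 then
      (set_row ++ [[start, i]], empty_previous, start)
    else if cell = 0 ∧ ¬ empty_previous then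
      (set_row ++ [[start, i - 1]], true, start)
    else (set_row, empty_previous, start)

def get_set_row (row : List Int) : List (List Int) :=
  ((PySem.List.enumerate row 0).foldl (stepA (row.length : Int)) ([], true, 0)).1

-- ===== PORT B =====
-- outer while: l is the unscanned suffix, i its first index; inner while = takeWhile
def altGo : List Int → Int → List (List Int)
  | [], _ => []
  | c :: rest, i =>
    if c = 0 then altGo rest (i + 1)
    else
      let run := rest.takeWhile (fun x => x != 0)
      let j := i + (run.length : Int)
      [i, j] :: altGo (rest.dropWhile (fun x => x != 0)) (j + 1)
termination_by l _ => l.length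
decreasing_by
  · simp
  · have := List.length_dropWhile_le (fun x => x != 0) rest
    simp only [List.length_cons]
    omega

def get_set_row_alt (row : List Int) : List (List Int) := altGo row 0

-- ===== PRECONDITION & SPEC =====
def Spec_get_set_row (row : List Int) (out : List (List Int)) : Prop := out = get_set_row_alt row
instance (row : List Int) (out : List (List Int)) : Decidable (Spec_get_set_row row out) := by unfold Spec_get_set_row; infer_instance

-- ===== CLAIM (what is proved, stated in full; the proofs are below) =====
def Claim_equal_get_set_row : Prop := ∀ (row : List Int), Dom_get_set_row row → Spec_get_set_row row (get_set_row row)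

-- ===== LEMMAS AND PROOFS =====

-- What A computes from state empty_previous = false, start = st, at index i on suffix l
def closeA (st : Int) : Int → List Int → List (List Int)
  | _, [] => []
  | i, c :: rest =>
    if c = 0 then [st, i - 1] :: altGo rest (i + 1)
    else if rest = [] then [[st, i]]
    else closeA st (i + 1) rest

lemma altGo_cons_zero (rest : List Int) (i : Int) : altGo (0 :: rest) i = altGo rest (i + 1) := by
  simp [altGo]

lemma altGo_cons_ne (c : Int) (rest : List Int) (i : Int) (hc : c ≠ 0) :
    altGo (c :: rest) i =
      [i, i + ((rest.takeWhile (fun x => x != 0)).length : Int)] ::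
        altGo (rest.dropWhile (fun x => x != 0))
          (i + ((rest.takeWhile (fun x => x != 0)).length : Int) + 1) := by
  simp [altGo, hc]

lemma closeA_eq_altGo (tl : List Int) : ∀ (st i : Int), tl ≠ [] →
    closeA st i tl =
      [st, i - 1 + ((tl.takeWhile (fun x => x != 0)).length : Int)] ::
        altGo (tl.dropWhile (fun x => x != 0))
          (i + ((tl.takeWhile (fun x => x != 0)).length : Int)) := by
  induction tl with
  | nil => intro st i h; exact absurd rfl h
  | cons t ts ih =>
    intro st i _
    by_cases ht : t = 0
    · subst ht
      simp [closeA, List.takeWhile, List.dropWhile, altGo_cons_zero]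
    · have hb : (t != 0) = true := by simpa using ht
      by_cases hts : ts = []
      · subst hts
        simp [closeA, ht, hb, List.takeWhile, List.dropWhile, altGo]
      · rw [show closeA st i (t :: ts) = closeA st (i + 1) ts from by
          simp [closeA, ht, hts]]
        rw [ih st (i + 1) hts]
        simp only [List.takeWhile_cons, List.dropWhile_cons, hb, if_true]
        have hL : (((t :: ts.takeWhile (fun x => x != 0)).length : Nat) : Int)
            = ((ts.takeWhile (fun x => x != 0)).length : Int) + 1 := by
          simp
        rw [hL,
          show i + 1 - 1 + ((ts.takeWhile (fun x => x != 0)).length : Int)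
              = i - 1 + (((ts.takeWhile (fun x => x != 0)).length : Int) + 1) from by ring,
          show i + 1 + ((ts.takeWhile (fun x => x != 0)).length : Int)
              = i + (((ts.takeWhile (fun x => x != 0)).length : Int) + 1) from by ring]

lemma loopA (l : List Int) : ∀ (n k : Int) (acc : List (List Int)) (st : Int),
    k + (l.length : Int) = n →
    (((PySem.List.enumerate l k).foldl (stepA n) (acc, true, st)).1 = acc ++ altGo l k)
    ∧ (((PySem.List.enumerate l k).foldl (stepA n) (acc, false, st)).1 = acc ++ closeA st k l) := by
  induction l with
  | nil => intro n k acc st _; simp [PySem.List.enumerate_nil, altGo, closeA]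
  | cons c tl ih =>
    intro n k acc st hn
    simp only [List.length_cons] at hn
    push_cast at hn
    rw [PySem.List.enumerate_cons]
    by_cases htl : tl = []
    · -- last cell: k = n - 1
      subst htl
      have hk : k = n - 1 := by simp at hn; omega
      constructor
      · by_cases hc : c = 0
        · subst hc
          simp [List.foldl_cons, stepA, PySem.List.enumerate_nil, altGo]
        · rw [List.foldl_cons,
            show stepA n (acc, true, st) (k, c) = (acc ++ [[k, k]], false, k) from by
              simp [stepA, hc, hk]]
          simp [PySem.List.enumerate_nil, altGo, hc]
      · by_cases hc : c = 0
        · subst hc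
          rw [List.foldl_cons,
            show stepA n (acc, false, st) (k, 0) = (acc ++ [[st, k - 1]], true, st) from by
              simp [stepA]]
          simp [PySem.List.enumerate_nil, closeA, altGo]
        · rw [List.foldl_cons,
            show stepA n (acc, false, st) (k, c) = (acc ++ [[st, k]], false, st) from by
              simp [stepA, hc, hk]]
          simp [PySem.List.enumerate_nil, closeA, hc]
    · -- not the last cell: k ≠ n - 1
      have hlen : tl.length ≠ 0 := by simpa using htl
      have hk : k ≠ n - 1 := by omega
      have hn' : (k + 1) + (tl.length : Int) = n := by omega
      constructor
      · by_cases hc : c = 0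
        · subst hc
          rw [List.foldl_cons,
            show stepA n (acc, true, st) (k, 0) = (acc, true, st) from by simp [stepA],
            (ih n (k + 1) acc st hn').1, altGo_cons_zero]
        · rw [List.foldl_cons,
            show stepA n (acc, true, st) (k, c) = (acc, false, k) from by
              simp [stepA, hc, hk],
            (ih n (k + 1) acc k hn').2, closeA_eq_altGo tl k (k + 1) htl,
            altGo_cons_ne c tl k hc,
            show k + 1 - 1 + ((tl.takeWhile (fun x => x != 0)).length : Int)
                = k + ((tl.takeWhile (fun x => x != 0)).length : Int) from by ring,
            show k + 1 + ((tl.takeWhile (fun x => x != 0)).length : Int)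
                = k + ((tl.takeWhile (fun x => x != 0)).length : Int) + 1 from by ring]
      · by_cases hc : c = 0
        · subst hc
          rw [List.foldl_cons,
            show stepA n (acc, false, st) (k, 0) = (acc ++ [[st, k - 1]], true, st) from by
              simp [stepA],
            (ih n (k + 1) (acc ++ [[st, k - 1]]) st hn').1,
            show closeA st k (0 :: tl) = [st, k - 1] :: altGo tl (k + 1) from by
              simp [closeA]]
          simp
        · rw [List.foldl_cons,
            show stepA n (acc, false, st) (k, c) = (acc, false, st) from by
              simp [stepA, hc, hk],
            (ih n (k + 1) acc st hn').2,
            show closeA st k (c :: tl) = closeA st (k + 1) tl from by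
              simp [closeA, hc, htl]]

-- ===== VERDICT (by name: the statement is the Claim_ definition above) =====
theorem get_set_row_spec : Claim_equal_get_set_row := by
  intro row _
  unfold Spec_get_set_row get_set_row get_set_row_alt
  have := (loopA row (row.length : Int) 0 [] 0 (by omega)).1
  simpa using this
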